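-- pv_equiv track=rewrite | github.com/curatorcorpus/FirstProgramming | Python/Finished Simple Programs/date_converter/date_converter.py | date_converter
-- ===== SOURCE A (Python) =====
-- def date_converter(numerical_date):
--     """
--
--     >>> date_converter("22/12/1995")
--     '22nd December, 1995'
--     >>> date_converter("14/11/1996")
--     '14th November, 1996'
--     >>> date_converter("05/06/1900")
--     '5th June, 1900'
--     >>> date_converter("01/01/1111")
--     '1st January, 1111'
--     >>> date_converter("02/02/2015")
--     '2nd Feburary, 2015'
--     >>> date_converter("31/12/2300")
--     '31st December, 2300'
--     >>> date_converter("23/10/2000")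
--     '23rd October, 2000'
--     >>> date_converter("16/09/2006")
--     '16th September, 2006'
--     """
--     #st = ["1", "21", "31"] #how to used the list st = ["1", "21", "31"] doesnt work
--     final_date = ""
--     zero = "0"
--     first_number = numerical_date[:1]
--     day = numerical_date[1:2]
--     month = numerical_date[3:5]
--     year = numerical_date[6:]
--     # day
--     for char in first_number:
--         if char not in zero:
--             final_date += char
--     final_date1 = final_date
--
--     for char in day:
--         final_date1 += char
--
--     if final_date1 == "1" or final_date1 == "21" or final_date1 == "31":
--         final_date1 += "st" + " "
--     elif final_date1 == "2" or final_date1 == "22": #multi if statements is a no no why?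
--         final_date1 += "nd" + " "
--     elif final_date1 == "3" or final_date1 == "23":
--          final_date1 += "rd" + " "
--     else:
--         final_date1 += "th" + " "
--     final_date2 = final_date1
--
--     if month == "01":
--         final_date2 += "January" + ", "
--     elif month == "02":
--         final_date2 += "Feburary" + ", "
--     elif month == "03":
--         final_date2 += "March" + ", "
--     elif month == "04":
--         final_date2 += "April" + ", "
--     elif month == "05":
--         final_date2 += "May" + ", "            #put this into list
--     elif month == "06":
--         final_date2 += "June" + ", "            #apparently using if in this situation works
--     elif month == "07":
--         final_date2 += "July" + ", "
--     elif month == "08":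
--         final_date2 += "August" + ", "
--     elif month == "09":
--         final_date2 += "September" + ", "
--     elif month == "10":
--         final_date2 += "October" + ", "
--     elif month == "11":
--         final_date2 += "November" + ", "
--     elif month == "12":
--         final_date2 += "December" + ", "
--     #year
--     final_date2 += year
--     return final_date2
-- ===== SOURCE B (Python) =====
-- _MONTHS = {
--     "01": "January, ", "02": "Feburary, ", "03": "March, ", "04": "April, ",
--     "05": "May, ", "06": "June, ", "07": "July, ", "08": "August, ",
--     "09": "September, ", "10": "October, ", "11": "November, ", "12": "December, ",
-- }
-- _SUFFIX = {"1": "st", "21": "st", "31": "st",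
--            "2": "nd", "22": "nd",
--            "3": "rd", "23": "rd"}
--
--
-- def date_converter(numerical_date):
--     # Single indexed pass over the characters: positions 0-1 feed the day
--     # (a leading '0' at position 0 is dropped), 3-4 the month key, >= 6 the
--     # year; everything else is a separator.  The pieces are then assembled
--     # with two table lookups (suffix dict defaulting to "th", month dict
--     # whose values carry the ", " so a miss contributes nothing).
--     day = month = year = ""
--     for i, ch in enumerate(numerical_date):
--         if i == 0:
--             if ch != "0":
--                 day += ch
--         elif i == 1:
--             day += ch
--         elif i == 3 or i == 4:
--             month += ch
--         elif i >= 6: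
--             year += ch
--     return day + _SUFFIX.get(day, "th") + " " + _MONTHS.get(month, "") + year
-- ===== Notes on version B (the rewrite author's own statement) =====
-- stated objective: alternative
-- what changed: Replaces A's staged slicing, per-character accumulation loops and 16-branch if/elif chains by one enumerate-driven pass that dispatches each character by position into day/month/year buckets, then assembles the result with two table lookups (suffix dict defaulting to 'th', month dict whose values carry the ', ').
import Mathlib
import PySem

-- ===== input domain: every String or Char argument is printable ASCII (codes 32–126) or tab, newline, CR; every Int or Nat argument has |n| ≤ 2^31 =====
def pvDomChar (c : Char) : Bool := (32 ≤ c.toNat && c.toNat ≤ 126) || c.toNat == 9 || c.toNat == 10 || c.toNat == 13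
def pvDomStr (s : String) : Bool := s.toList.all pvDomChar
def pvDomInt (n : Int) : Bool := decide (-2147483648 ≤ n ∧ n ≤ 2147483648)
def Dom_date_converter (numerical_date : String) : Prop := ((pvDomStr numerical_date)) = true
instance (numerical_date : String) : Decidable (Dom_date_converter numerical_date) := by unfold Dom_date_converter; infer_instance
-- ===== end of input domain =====

-- B replaces A's staged slicing, per-character loops and 16-branch if/elif chains with a
-- single enumerate-driven pass dispatching characters by position into day/month/year
-- buckets plus two table lookups — an alternative decomposition, same cost; equivalence
-- of the RETURN value is proved.

-- ===== PORT A =====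
-- literal transliteration of A on the code-point list (strings built as List Char, joined at the end)
def date_converter (numerical_date : String) : String :=
  let s := numerical_date.toList
  let zero := "0".toList
  let first_number := PySem.List.slice s none (some 1)
  let day := PySem.List.slice s (some 1) (some 2)
  let month := PySem.List.slice s (some 3) (some 5)
  let year := PySem.List.slice s (some 6) none
  let final_date : List Char :=
    first_number.foldl (fun acc c => if c ∉ zero then acc ++ [c] else acc) []
  let final_date1 := day.foldl (fun acc c => acc ++ [c]) final_date
  let final_date1 :=
    if final_date1 = "1".toList ∨ final_date1 = "21".toList ∨ final_date1 = "31".toList then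
      final_date1 ++ ("st" ++ " ").toList
    else if final_date1 = "2".toList ∨ final_date1 = "22".toList then
      final_date1 ++ ("nd" ++ " ").toList
    else if final_date1 = "3".toList ∨ final_date1 = "23".toList then
      final_date1 ++ ("rd" ++ " ").toList
    else
      final_date1 ++ ("th" ++ " ").toList
  let final_date2 := final_date1
  let final_date2 :=
    if month = "01".toList then final_date2 ++ ("January" ++ ", ").toList
    else if month = "02".toList then final_date2 ++ ("Feburary" ++ ", ").toList
    else if month = "03".toList then final_date2 ++ ("March" ++ ", ").toList
    else if month = "04".toList then final_date2 ++ ("April" ++ ", ").toList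
    else if month = "05".toList then final_date2 ++ ("May" ++ ", ").toList
    else if month = "06".toList then final_date2 ++ ("June" ++ ", ").toList
    else if month = "07".toList then final_date2 ++ ("July" ++ ", ").toList
    else if month = "08".toList then final_date2 ++ ("August" ++ ", ").toList
    else if month = "09".toList then final_date2 ++ ("September" ++ ", ").toList
    else if month = "10".toList then final_date2 ++ ("October" ++ ", ").toList
    else if month = "11".toList then final_date2 ++ ("November" ++ ", ").toList
    else if month = "12".toList then final_date2 ++ ("December" ++ ", ").toList
    else final_date2
  String.ofList (final_date2 ++ year)

-- ===== PORT B =====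
-- module-level tables of Source B (dicts → PySem.Dict with List Char keys/values;
-- month values carry the ", " exactly as in Source B)
def pvMonths : PySem.Dict (List Char) (List Char) := PySem.Dict.mk
  [("01".toList, "January, ".toList), ("02".toList, "Feburary, ".toList),
   ("03".toList, "March, ".toList), ("04".toList, "April, ".toList),
   ("05".toList, "May, ".toList), ("06".toList, "June, ".toList),
   ("07".toList, "July, ".toList), ("08".toList, "August, ".toList),
   ("09".toList, "September, ".toList), ("10".toList, "October, ".toList),
   ("11".toList, "November, ".toList), ("12".toList, "December, ".toList)]

def pvSuffix : PySem.Dict (List Char) (List Char) := PySem.Dict.mk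
  [("1".toList, "st".toList), ("21".toList, "st".toList), ("31".toList, "st".toList),
   ("2".toList, "nd".toList), ("22".toList, "nd".toList),
   ("3".toList, "rd".toList), ("23".toList, "rd".toList)]

-- the loop body of Source B's enumerate pass (state = (day, month, year))
def pvStepB (acc : List Char × List Char × List Char) (p : Int × Char) :
    List Char × List Char × List Char :=
  if p.1 = 0 then (if p.2 ≠ '0' then (acc.1 ++ [p.2], acc.2.1, acc.2.2) else acc)
  else if p.1 = 1 then (acc.1 ++ [p.2], acc.2.1, acc.2.2)
  else if p.1 = 3 ∨ p.1 = 4 then (acc.1, acc.2.1 ++ [p.2], acc.2.2)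
  else if 6 ≤ p.1 then (acc.1, acc.2.1, acc.2.2 ++ [p.2])
  else acc

def date_converter_alt (numerical_date : String) : String :=
  let s := numerical_date.toList
  let st := (PySem.List.enumerate s 0).foldl pvStepB ([], [], [])
  String.ofList (st.1 ++ pvSuffix.getD st.1 "th".toList ++ " ".toList ++
    pvMonths.getD st.2.1 [] ++ st.2.2)

-- ===== PRECONDITION & SPEC =====
def Spec_date_converter (numerical_date : String) (out : String) : Prop := out = date_converter_alt numerical_date
instance (numerical_date : String) (out : String) : Decidable (Spec_date_converter numerical_date out) := by unfold Spec_date_converter; infer_instance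

-- ===== CLAIM (what is proved, stated in full; the proofs are below) =====
def Claim_equal_date_converter : Prop := ∀ (numerical_date : String), Dom_date_converter numerical_date → Spec_date_converter numerical_date (date_converter numerical_date)

-- ===== LEMMAS AND PROOFS =====

-- past index 5 the enumerate pass only appends to the year bucket
theorem pv_fold_tail (t : List Char) (k : Int) (hk : 6 ≤ k)
    (day month year : List Char) :
    (PySem.List.enumerate t k).foldl pvStepB (day, month, year) =
      (day, month, year ++ t) := by
  induction t generalizing k year with
  | nil => simp [PySem.List.enumerate]
  | cons c t ih =>
      have h0 : ¬ k = 0 := by omega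
      have h1 : ¬ k = 1 := by omega
      have h3 : ¬ (k = 3 ∨ k = 4) := by omega
      rw [PySem.List.enumerate_cons]
      simp only [List.foldl_cons, pvStepB, h0, h1, h3, hk, if_true, if_false]
      rw [ih (k + 1) (by omega)]
      simp

-- A's suffix chain is B's table lookup with default "th"
theorem pv_suffix_eq (d : List Char) :
    (if d = "1".toList ∨ d = "21".toList ∨ d = "31".toList then d ++ ("st" ++ " ").toList
     else if d = "2".toList ∨ d = "22".toList then d ++ ("nd" ++ " ").toList
     else if d = "3".toList ∨ d = "23".toList then d ++ ("rd" ++ " ").toList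
     else d ++ ("th" ++ " ").toList) =
    d ++ pvSuffix.getD d "th".toList ++ " ".toList := by
  by_cases h1 : d = "1".toList
  · subst h1; decide
  by_cases h2 : d = "21".toList
  · subst h2; decide
  by_cases h3 : d = "31".toList
  · subst h3; decide
  by_cases h4 : d = "2".toList
  · subst h4; decide
  by_cases h5 : d = "22".toList
  · subst h5; decide
  by_cases h6 : d = "3".toList
  · subst h6; decide
  by_cases h7 : d = "23".toList
  · subst h7; decide
  have n1 : ¬d = ['1'] := h1
  have n2 : ¬d = ['2', '1'] := h2
  have n3 : ¬d = ['3', '1'] := h3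
  have n4 : ¬d = ['2'] := h4
  have n5 : ¬d = ['2', '2'] := h5
  have n6 : ¬d = ['3'] := h6
  have n7 : ¬d = ['2', '3'] := h7
  simp [pvSuffix, PySem.Dict.getD, PySem.Dict.get?,
    n1, n2, n3, n4, n5, n6, n7,
    Ne.symm n1, Ne.symm n2, Ne.symm n3, Ne.symm n4, Ne.symm n5, Ne.symm n6, Ne.symm n7]

-- A's month chain is B's table lookup (values already carry ", "; a miss appends nothing)
theorem pv_month_eq (m : List Char) (pre : List Char) :
    (if m = "01".toList then pre ++ ("January" ++ ", ").toList
     else if m = "02".toList then pre ++ ("Feburary" ++ ", ").toList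
     else if m = "03".toList then pre ++ ("March" ++ ", ").toList
     else if m = "04".toList then pre ++ ("April" ++ ", ").toList
     else if m = "05".toList then pre ++ ("May" ++ ", ").toList
     else if m = "06".toList then pre ++ ("June" ++ ", ").toList
     else if m = "07".toList then pre ++ ("July" ++ ", ").toList
     else if m = "08".toList then pre ++ ("August" ++ ", ").toList
     else if m = "09".toList then pre ++ ("September" ++ ", ").toList
     else if m = "10".toList then pre ++ ("October" ++ ", ").toList
     else if m = "11".toList then pre ++ ("November" ++ ", ").toList
     else if m = "12".toList then pre ++ ("December" ++ ", ").toList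
     else pre) =
    pre ++ pvMonths.getD m [] := by
  by_cases g1 : m = "01".toList
  · subst g1; rfl
  by_cases g2 : m = "02".toList
  · subst g2; rfl
  by_cases g3 : m = "03".toList
  · subst g3; rfl
  by_cases g4 : m = "04".toList
  · subst g4; rfl
  by_cases g5 : m = "05".toList
  · subst g5; rfl
  by_cases g6 : m = "06".toList
  · subst g6; rfl
  by_cases g7 : m = "07".toList
  · subst g7; rfl
  by_cases g8 : m = "08".toList
  · subst g8; rfl
  by_cases g9 : m = "09".toList
  · subst g9; rfl
  by_cases g10 : m = "10".toList
  · subst g10; rfl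
  by_cases g11 : m = "11".toList
  · subst g11; rfl
  by_cases g12 : m = "12".toList
  · subst g12; rfl
  have n1 : ¬m = ['0', '1'] := g1
  have n2 : ¬m = ['0', '2'] := g2
  have n3 : ¬m = ['0', '3'] := g3
  have n4 : ¬m = ['0', '4'] := g4
  have n5 : ¬m = ['0', '5'] := g5
  have n6 : ¬m = ['0', '6'] := g6
  have n7 : ¬m = ['0', '7'] := g7
  have n8 : ¬m = ['0', '8'] := g8
  have n9 : ¬m = ['0', '9'] := g9
  have n10 : ¬m = ['1', '0'] := g10
  have n11 : ¬m = ['1', '1'] := g11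
  have n12 : ¬m = ['1', '2'] := g12
  simp [pvMonths, PySem.Dict.getD, PySem.Dict.get?,
    n1, n2, n3, n4, n5, n6, n7, n8, n9, n10, n11, n12,
    Ne.symm n1, Ne.symm n2, Ne.symm n3, Ne.symm n4, Ne.symm n5, Ne.symm n6,
    Ne.symm n7, Ne.symm n8, Ne.symm n9, Ne.symm n10, Ne.symm n11, Ne.symm n12]

-- the enumerate pass computes exactly A's three pieces: the stripped day, s[3:5], s[6:]
set_option maxHeartbeats 1000000 in
theorem pv_fold_eq (l : List Char) :
    (PySem.List.enumerate l 0).foldl pvStepB ([], [], []) =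
    ((PySem.List.slice l (some 1) (some 2)).foldl (fun acc c => acc ++ [c])
       ((PySem.List.slice l none (some 1)).foldl
         (fun acc c => if c ∉ ("0".toList) then acc ++ [c] else acc) []),
     PySem.List.slice l (some 3) (some 5),
     PySem.List.slice l (some 6) none) := by
  rcases l with _ | ⟨a, _ | ⟨b, _ | ⟨c, _ | ⟨d, _ | ⟨e, _ | ⟨f, t⟩⟩⟩⟩⟩⟩
  · decide
  all_goals
    by_cases ha : a = '0' <;>
    · simp [PySem.List.enumerate_cons, PySem.List.enumerate_nil, pvStepB, ha]
      try rw [pv_fold_tail _ 6 (by norm_num)]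
      simp [PySem.List.slice, PySem.List.clampIdx, List.foldl, ha]

-- ===== VERDICT (by name: the statement is the Claim_ definition above) =====
theorem date_converter_spec : Claim_equal_date_converter := by
  intro s _
  unfold Spec_date_converter date_converter date_converter_alt
  simp only []
  rw [pv_fold_eq, pv_suffix_eq, pv_month_eq]
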